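-- pv_equiv track=rewrite | github.com/Kipwisp/advent-of-code-2020 | day_17/day_17.py | generate_coords
-- ===== SOURCE A (Python) =====
-- def generate_coords(lines, dimensions):
--     result = {}
--     for y in range(-1, len(lines) + 1):
--             for x in range(-1, len(lines[0]) + 1):
--                 result[(x, y)] = lines[y][x] == '#' if 0 <= x < len(lines[0]) and 0 <= y < len(lines) else False
--
--     layers = [range(-1, 2) for i in range(dimensions - 2)]
--     for layer in layers:
--         new = {}
--         for z in layer:
--             for coord in result:
--                 new[(*coord, z)] = result[coord] if z == 0 else False
--         result = new
--
--     return result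
-- ===== SOURCE B (Python) =====
-- def generate_coords(lines, dimensions):
--     w, h = len(lines[0]), len(lines)
--     # precompute the 2-D activity map by scanning the input grid once
--     grid = {(x, y): lines[y][x] == '#' for y in range(h) for x in range(w)}
--     # phase 1: fill every padded coordinate with False, by an explicit-stack
--     # depth-first walk of the axes (axes listed outermost-first)
--     axes = [range(-1, 2)] * (dimensions - 2) + [range(-1, h + 1), range(-1, w + 1)]
--     result = {}
--     stack = [((), axes)]
--     while stack:
--         suffix, rest = stack.pop()
--         if rest:
--             for v in reversed(rest[0]):
--                 stack.append(((v,) + suffix, rest[1:]))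
--         else:
--             result[suffix] = False
--     # phase 2: overwrite the active cells with the precomputed map
--     zeros = (0,) * (dimensions - 2)
--     for (x, y), val in grid.items():
--         result[(x, y) + zeros] = val
--     return result
-- ===== Notes on version B (the rewrite author's own statement) =====
-- stated objective: alternative
-- what changed: Three-step construction: precompute the 2-D activity map by one scan of the input grid, fill every padded coordinate of the cartesian product with False via an explicit-stack depth-first walk of the axes, then overwrite only the in-bounds cells (x,y,0,...,0) from the precomputed map; A instead computes per-cell values inside its 2-D pass and rebuilds the dict layer by layer for each extra dimension. Pre_ excludes only the inputs (empty lines list, or a row shorter than the first) on which A raises IndexError.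
import Mathlib
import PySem

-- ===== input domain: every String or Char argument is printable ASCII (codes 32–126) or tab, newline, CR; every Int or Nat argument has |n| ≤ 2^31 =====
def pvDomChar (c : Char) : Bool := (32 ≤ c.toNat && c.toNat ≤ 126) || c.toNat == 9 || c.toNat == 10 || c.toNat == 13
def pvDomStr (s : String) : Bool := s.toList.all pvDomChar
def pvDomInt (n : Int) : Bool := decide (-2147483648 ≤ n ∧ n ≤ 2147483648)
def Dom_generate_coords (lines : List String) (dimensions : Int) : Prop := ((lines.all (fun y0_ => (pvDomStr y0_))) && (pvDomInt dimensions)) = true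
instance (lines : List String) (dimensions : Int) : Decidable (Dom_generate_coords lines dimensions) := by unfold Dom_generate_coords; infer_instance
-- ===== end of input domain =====

-- B precomputes the 2-D activity map from the input grid, fills every padded coordinate with
-- False by an explicit-stack walk of the axes, then overwrites the in-bounds cells — instead of
-- A's per-cell predicate in the 2-D pass followed by per-dimension dict re-layering (objective: alternative).

-- ===== PORT A =====
-- value stored for (x, y) in A's 2-D phase: 'lines[y][x] == "#" if in-bounds else False'
def pvValA (lines : List String) (w h x y : Int) : Bool :=
  if 0 ≤ x ∧ x < w ∧ 0 ≤ y ∧ y < h then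
    ((PySem.List.pyGet? lines y).bind fun s => PySem.Str.pyGet? s x) == some '#'
  else false

def generate_coords (lines : List String) (dimensions : Int) : List (List Int × Bool) :=
  -- len(lines[0]): exact under Pre_ (lines ≠ [])
  let w : Int := PySem.Str.len (PySem.List.pyGetD lines 0 "")
  let h : Int := (lines.length : Int)
  let grid : PySem.Dict (List Int) Bool :=
    (PySem.List.pyRange (-1) (h + 1) 1).foldl (fun d y =>
      (PySem.List.pyRange (-1) (w + 1) 1).foldl (fun d x =>
        d.insert [x, y] (pvValA lines w h x y)) d) PySem.Dict.empty
  let layers := (PySem.List.pyRange 0 (dimensions - 2) 1).map (fun _ => PySem.List.pyRange (-1) 2 1)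
  let result := layers.foldl (fun res layer =>
    layer.foldl (fun new z =>
      res.keys.foldl (fun new coord =>
        new.insert (coord ++ [z]) (if z == 0 then res.getD coord false else false)) new)
      PySem.Dict.empty) grid
  result.items

-- ===== PORT B =====
-- termination measure for the explicit-stack walk: nodes at or below a pending entry
def pvWeight : List (List Int) → Nat
  | [] => 1
  | a :: r => 1 + a.length * pvWeight r

-- the 'while stack: …' loop; the stack's top is the list head (Python pops/pushes at the
-- end and pushes children reversed, so the children are processed front-to-back, i.e. the
-- popped entry is replaced by its children in axis order: exactly the map-prepend below)
def pvFillLoop (stack : List (List Int × List (List Int))) (d : PySem.Dict (List Int) Bool) :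
    PySem.Dict (List Int) Bool :=
  match stack with
  | [] => d
  | (suffix, []) :: stk => pvFillLoop stk (d.insert suffix false)
  | (suffix, a :: r) :: stk => pvFillLoop ((a.map (fun v => (v :: suffix, r))) ++ stk) d
termination_by (stack.map (fun p => pvWeight p.2)).sum
decreasing_by
  · simp [pvWeight]
  · simp only [List.map_append, List.map_map, List.sum_append, List.map_cons, List.sum_cons,
      Function.comp_def, pvWeight]
    have hconst : (List.map (fun _ => pvWeight r) a.attach).sum = a.length * pvWeight r := by
      rw [List.map_const', List.sum_replicate, smul_eq_mul, List.length_attach]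
    rw [hconst]
    omega

def generate_coords_alt (lines : List String) (dimensions : Int) : List (List Int × Bool) :=
  let w : Int := PySem.Str.len (PySem.List.pyGetD lines 0 "")
  let h : Int := (lines.length : Int)
  -- grid = {(x, y): lines[y][x] == '#' for y in range(h) for x in range(w)}
  let grid : PySem.Dict (Int × Int) Bool :=
    (PySem.List.pyRange 0 h 1).foldl (fun d y =>
      (PySem.List.pyRange 0 w 1).foldl (fun d x =>
        d.insert (x, y) (((PySem.List.pyGet? lines y).bind fun s => PySem.Str.pyGet? s x) == some '#')) d)
      PySem.Dict.empty
  -- axes = [range(-1, 2)] * (dimensions - 2) + [range(-1, h + 1), range(-1, w + 1)]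
  let axes := List.replicate (dimensions - 2).toNat (PySem.List.pyRange (-1) 2 1) ++
    [PySem.List.pyRange (-1) (h + 1) 1, PySem.List.pyRange (-1) (w + 1) 1]
  let filled := pvFillLoop [([], axes)] PySem.Dict.empty
  let zeros : List Int := List.replicate (dimensions - 2).toNat 0
  -- phase 2: overwrite the active cells with the precomputed map
  let result := grid.items.foldl (fun d p => d.insert ([p.1.1, p.1.2] ++ zeros) p.2) filled
  result.items

-- ===== PRECONDITION & SPEC =====
-- Pre_ excludes exactly the inputs on which Python A raises IndexError: an empty lines list
-- (len(lines[0])), or a row shorter than the first row (lines[y][x] with x < len(lines[0])).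
def Pre_generate_coords (lines : List String) (dimensions : Int) : Prop :=
  lines ≠ [] ∧ ∀ s ∈ lines, PySem.Str.len (lines.headD "") ≤ PySem.Str.len s
instance (lines : List String) (dimensions : Int) : Decidable (Pre_generate_coords lines dimensions) := by unfold Pre_generate_coords; infer_instance
def pvWitness_generate_coords : List String × Int := (["#.", ".#"], 3)

def Spec_generate_coords (lines : List String) (dimensions : Int) (out : List (List Int × Bool)) : Prop := out = generate_coords_alt lines dimensions
instance (lines : List String) (dimensions : Int) (out : List (List Int × Bool)) : Decidable (Spec_generate_coords lines dimensions out) := by unfold Spec_generate_coords; infer_instance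

-- ===== CLAIM (what is proved, stated in full; the proofs are below) =====
def Claim_equal_generate_coords : Prop := ∀ (lines : List String) (dimensions : Int), Dom_generate_coords lines dimensions → Pre_generate_coords lines dimensions → Spec_generate_coords lines dimensions (generate_coords lines dimensions)

-- ===== LEMMAS AND PROOFS =====

-- the closed-form value both sides end up storing at a key
def pvVal (lines : List String) (w h : Int) (c : List Int) : Bool :=
  let x := PySem.List.pyGetD c 0 0
  let y := PySem.List.pyGetD c 1 0
  decide (0 ≤ x) && decide (x < w) && decide (0 ≤ y) && decide (y < h) &&
    (((PySem.List.pyGet? lines y).bind fun s => PySem.Str.pyGet? s x) == some '#') &&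
    (PySem.List.slice c (some 2) none).all (fun z => z == 0)

-- the canonical association list A computes, layer by layer
def pvGrid (lines : List String) (w h : Int) : List (List Int × Bool) :=
  (PySem.List.pyRange (-1) (h + 1) 1).flatMap (fun y =>
    (PySem.List.pyRange (-1) (w + 1) 1).map fun x => ([x, y], pvValA lines w h x y))

def pvLayer (L : List (List Int × Bool)) : List (List Int × Bool) :=
  (PySem.List.pyRange (-1) 2 1).flatMap (fun z =>
    L.map fun p => (p.1 ++ [z], if z == 0 then p.2 else false))

def pvIter : Nat → List (List Int × Bool) → List (List Int × Bool)
  | 0, L => L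
  | n + 1, L => pvIter n (pvLayer L)

-- recursive formulation of the fill, for the proof
def pvFill (axes : List (List Int)) (suffix : List Int) (d : PySem.Dict (List Int) Bool) :
    PySem.Dict (List Int) Bool :=
  match axes with
  | [] => d.insert suffix false
  | a :: rest => a.foldl (fun d v => pvFill rest (v :: suffix) d) d

-- B's fill visits exactly this ordered key list
def pvKeys (axes : List (List Int)) (suffix : List Int) : List (List Int) :=
  match axes with
  | [] => [suffix]
  | a :: rest => a.flatMap (fun v => pvKeys rest (v :: suffix))

-- loop invariant: distinct keys, all of length m, each value = the closed-form predicate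
def pvProps (lines : List String) (w h : Int) (m : Nat) (L : List (List Int × Bool)) : Prop :=
  (L.map (·.1)).Nodup ∧ ∀ p ∈ L, p.1.length = m ∧ pvVal lines w h p.1 = p.2

lemma pv_val_base (lines : List String) (w h x y : Int) :
    pvVal lines w h [x, y] = pvValA lines w h x y := by
  unfold pvValA pvVal
  have h2 : PySem.List.slice [x, y] (some 2) none = [] := by
    have := PySem.List.slice_from_natCast (xs := [x,y]) (a := 2); exact_mod_cast this
  have h0 : PySem.List.pyGetD [x, y] (0:Int) 0 = x := by simp [PySem.List.pyGetD]
  have h1 : PySem.List.pyGetD [x, y] (1:Int) 0 = y := by simp [PySem.List.pyGetD]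
  rw [h2]; simp only [h0, h1, List.all_nil, Bool.and_true]
  by_cases hx : 0 ≤ x <;> by_cases hx2 : x < w <;> by_cases hy : 0 ≤ y <;> by_cases hy2 : y < h <;>
    simp [hx, hx2, hy, hy2]

lemma pv_val_step (lines : List String) (w h : Int) (c : List Int) (z : Int)
    (hc : 2 ≤ c.length) :
    pvVal lines w h (c ++ [z]) = (if z == 0 then pvVal lines w h c else false) := by
  obtain ⟨a, b, t, rfl⟩ : ∃ a b t, c = a :: b :: t := by
    match c, hc with | a :: b :: t, _ => exact ⟨a, b, t, rfl⟩
  unfold pvVal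
  have h2 : ∀ (l : List Int), PySem.List.slice l (some 2) none = l.drop 2 := by
    intro l; have := PySem.List.slice_from_natCast (xs := l) (a := 2); exact_mod_cast this
  have h0 : ∀ (l : List Int) (u v : Int), PySem.List.pyGetD (u :: v :: l) (0:Int) 0 = u := by
    intro l u v; simp [PySem.List.pyGetD]
  have h1 : ∀ (l : List Int) (u v : Int), PySem.List.pyGetD (u :: v :: l) (1:Int) 0 = v := by
    intro l u v; simp [PySem.List.pyGetD]
  simp only [List.cons_append, h0, h1, h2, List.drop_succ_cons, List.drop_zero, List.all_append,
    List.all_cons, List.all_nil, Bool.and_true]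
  by_cases hz : z = 0 <;> simp [hz, Bool.and_comm, Bool.and_assoc, Bool.and_left_comm]

-- pvVal ignores an all-zero tail
lemma pv_val_zeros (lines : List String) (w h : Int) (c : List Int) (hc : 2 ≤ c.length) :
    ∀ n, pvVal lines w h (c ++ List.replicate n 0) = pvVal lines w h c := by
  intro n
  induction n with
  | zero => simp
  | succ n ih =>
    rw [List.replicate_succ', ← List.append_assoc,
      pv_val_step lines w h (c ++ List.replicate n 0) 0 (by simp; omega)]
    simpa using ih

lemma pv_grid_props (lines : List String) (w h : Int) :
    pvProps lines w h 2 (pvGrid lines w h) := by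
  refine ⟨?_, ?_⟩
  · unfold pvGrid
    rw [List.map_flatMap]
    rw [List.nodup_flatMap]
    constructor
    · intro y _
      rw [List.map_map]
      exact (PySem.List.nodup_pyRange_one _ _).map (fun a b hab => by simpa using hab)
    · refine (PySem.List.nodup_pyRange_one _ _).imp ?_
      intro y y' hne k hk hk'
      simp only [List.map_map, List.mem_map] at hk hk'
      obtain ⟨x, _, rfl⟩ := hk
      obtain ⟨x', _, h'⟩ := hk'
      simp at h'
      exact hne (h'.2 ▸ rfl)
  · intro p hp
    unfold pvGrid at hp
    simp only [List.mem_flatMap, List.mem_map] at hp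
    obtain ⟨y, _, x, _, rfl⟩ := hp
    exact ⟨rfl, pv_val_base lines w h x y⟩

lemma pv_layer_props (lines : List String) (w h : Int) (m : Nat) (L : List (List Int × Bool))
    (hm : 2 ≤ m) (hL : pvProps lines w h m L) : pvProps lines w h (m + 1) (pvLayer L) := by
  obtain ⟨hnd, hall⟩ := hL
  refine ⟨?_, ?_⟩
  · unfold pvLayer
    rw [List.map_flatMap, List.nodup_flatMap]
    constructor
    · intro z _
      rw [List.map_map]
      have : (L.map fun p => (p.1 ++ [z])) = (L.map (·.1)).map (fun k => k ++ [z]) := by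
        simp [List.map_map]
      show (L.map _).Nodup
      simp only [Function.comp_def]
      rw [this]
      exact hnd.map (fun a b hab => by simpa using hab)
    · refine (PySem.List.nodup_pyRange_one _ _).imp ?_
      intro z z' hne k hk hk'
      simp only [List.map_map, Function.comp_def, List.mem_map] at hk hk'
      obtain ⟨p, hp, rfl⟩ := hk
      obtain ⟨q, hq, h'⟩ := hk'
      have hlq : q.1.length = p.1.length := by rw [(hall q hq).1, (hall p hp).1]
      have := List.append_inj_right h' hlq
      simp at this
      exact hne (this ▸ rfl)
  · intro p hp
    unfold pvLayer at hp
    simp only [List.mem_flatMap, List.mem_map] at hp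
    obtain ⟨z, _, q, hq, rfl⟩ := hp
    obtain ⟨hlen, hval⟩ := hall q hq
    constructor
    · simp [hlen]
    · rw [pv_val_step lines w h q.1 z (by omega), hval]

lemma pv_iter_props (lines : List String) (w h : Int) :
    ∀ (n m : Nat) (L : List (List Int × Bool)), 2 ≤ m → pvProps lines w h m L →
    pvProps lines w h (m + n) (pvIter n L) := by
  intro n
  induction n with
  | zero => intro m L _ hL; simpa using hL
  | succ n ih =>
    intro m L hm hL
    have := ih (m + 1) (pvLayer L) (by omega) (pv_layer_props lines w h m L hm hL)
    show pvProps lines w h (m + (n+1)) (pvIter n (pvLayer L))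
    have heq : m + (n + 1) = (m + 1) + n := by omega
    rw [heq]; exact this

-- peel the layering from the OUTSIDE instead of the inside
lemma pv_iter_succ_out : ∀ (n : Nat) (L : List (List Int × Bool)),
    pvIter (n + 1) L = pvLayer (pvIter n L) := by
  intro n
  induction n with
  | zero => intro L; rfl
  | succ n ih =>
    intro L
    show pvIter (n + 1) (pvLayer L) = _
    rw [ih (pvLayer L)]
    rfl

lemma pv_keys_to_items (L : List (List Int × Bool)) (hn : (L.map (·.1)).Nodup) (z : Int)
    (init : PySem.Dict (List Int) Bool) :
    (PySem.Dict.mk L).keys.foldl (fun new coord =>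
        new.insert (coord ++ [z])
          (if z == 0 then (PySem.Dict.mk L).getD coord false else false)) init
      = L.foldl (fun new p => new.insert (p.1 ++ [z]) (if z == 0 then p.2 else false)) init := by
  have hk : (PySem.Dict.mk L).keys = L.map (·.1) := rfl
  rw [hk, List.foldl_map]
  apply PySem.List.foldl_congr_mem
  intro acc p hp
  have hmem : (p.1, p.2) ∈ (PySem.Dict.mk L).items := by simpa using hp
  rw [PySem.Dict.getD_of_mem_items _ hmem hn false]

lemma pv_rows (lines : List String) (w h : Int) :
    ∀ (ys : List Int) (d : PySem.Dict (List Int) Bool),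
    ys.Nodup → d.keys.Nodup →
    (∀ k ∈ d.keys, ∀ y ∈ ys, ∀ x ∈ PySem.List.pyRange (-1) (w + 1) 1, k ≠ [x, y]) →
    ((ys.foldl (fun d y =>
        (PySem.List.pyRange (-1) (w + 1) 1).foldl (fun d x =>
          d.insert [x, y] (pvValA lines w h x y)) d) d).items)
      = d.items ++ ys.flatMap (fun y =>
          (PySem.List.pyRange (-1) (w + 1) 1).map fun x => ([x, y], pvValA lines w h x y)) := by
  intro ys
  induction ys with
  | nil => intro d _ _ _; simp
  | cons y ys ih =>
    intro d hys hd hdisj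
    have hyne : y ∉ ys := (List.nodup_cons.mp hys).1
    set xs := PySem.List.pyRange (-1) (w + 1) 1 with hxs
    have hfresh : ∀ x ∈ xs, d.contains ([x, y]) = false := by
      intro x hx
      by_contra hcb
      have : d.contains [x, y] = true := by revert hcb; cases d.contains [x,y] <;> simp
      have hk : [x, y] ∈ d.keys := (PySem.Dict.contains_iff_mem_keys _ _).mp this
      exact hdisj _ hk y (List.mem_cons_self) x hx rfl
    have hknd : (xs.map fun x => ([x, y] : List Int)).Nodup := by
      refine (PySem.List.nodup_pyRange_one _ _).map ?_
      intro a b hab; simpa using hab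
    have hrow := PySem.Dict.items_foldl_insert_fresh xs (fun x => [x, y])
      (fun x => pvValA lines w h x y) d hfresh hknd
    set d' := xs.foldl (fun d x => d.insert [x, y] (pvValA lines w h x y)) d with hd'
    have hkeys' : d'.keys = d.keys ++ xs.map (fun x => [x, y]) := by
      show d'.items.map (·.1) = _
      rw [hrow]; simp [PySem.Dict.keys]
    have hnd' : d'.keys.Nodup := by
      exact PySem.Dict.nodup_keys_foldl_insert_key xs (fun x => [x,y]) (fun _ x => pvValA lines w h x y) d hd
    have hdisj' : ∀ k ∈ d'.keys, ∀ y' ∈ ys, ∀ x ∈ xs, k ≠ [x, y'] := by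
      intro k hk y' hy' x hx
      rw [hkeys'] at hk
      rcases List.mem_append.mp hk with hk | hk
      · exact hdisj k hk y' (List.mem_cons_of_mem _ hy') x hx
      · obtain ⟨x', _, rfl⟩ := List.mem_map.mp hk
        intro heq
        have : y = y' := by
          have := heq; simp at this; exact this.2
        exact hyne (this ▸ hy')
    have := ih d' ((List.nodup_cons.mp hys).2) hnd' hdisj'
    simp only [List.foldl_cons]
    rw [← hd', this, hrow]
    simp [List.flatMap_cons]

lemma pv_layer_fold (L : List (List Int × Bool)) (m : Nat) :
    ∀ (zl : List Int) (d : PySem.Dict (List Int) Bool),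
    zl.Nodup → (L.map (·.1)).Nodup → (∀ p ∈ L, p.1.length = m) → d.keys.Nodup →
    (∀ k ∈ d.keys, ∀ z ∈ zl, ∀ p ∈ L, k ≠ p.1 ++ [z]) →
    ((zl.foldl (fun new z =>
        L.foldl (fun new p => new.insert (p.1 ++ [z]) (if z == 0 then p.2 else false)) new) d).items)
      = d.items ++ zl.flatMap (fun z => L.map fun p => (p.1 ++ [z], if z == 0 then p.2 else false)) := by
  intro zl
  induction zl with
  | nil => intro d _ _ _ _ _; simp
  | cons z zl ih =>
    intro d hzl hL hlen hd hdisj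
    have hzne : z ∉ zl := (List.nodup_cons.mp hzl).1
    have hfresh : ∀ p ∈ L, d.contains (p.1 ++ [z]) = false := by
      intro p hp
      by_contra hcb
      have : d.contains (p.1 ++ [z]) = true := by revert hcb; cases d.contains (p.1 ++ [z]) <;> simp
      have hk := (PySem.Dict.contains_iff_mem_keys _ _).mp this
      exact hdisj _ hk z (List.mem_cons_self) p hp rfl
    have hknd : (L.map fun p => p.1 ++ [z]).Nodup := by
      have : (L.map fun p => p.1 ++ [z]) = (L.map (·.1)).map (fun k => k ++ [z]) := by
        simp [List.map_map]
      rw [this]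
      exact hL.map (fun a b hab => by simpa using hab)
    have hrow := PySem.Dict.items_foldl_insert_fresh L (fun p => p.1 ++ [z])
      (fun p => if z == 0 then p.2 else false) d hfresh hknd
    set d' := L.foldl (fun new p => new.insert (p.1 ++ [z]) (if z == 0 then p.2 else false)) d with hd'
    have hkeys' : d'.keys = d.keys ++ L.map (fun p => p.1 ++ [z]) := by
      show d'.items.map (·.1) = _
      rw [hrow]; simp [PySem.Dict.keys]
    have hnd' : d'.keys.Nodup :=
      PySem.Dict.nodup_keys_foldl_insert_key L (fun p => p.1 ++ [z]) (fun _ p => if z == 0 then p.2 else false) d hd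
    have hdisj' : ∀ k ∈ d'.keys, ∀ z' ∈ zl, ∀ p ∈ L, k ≠ p.1 ++ [z'] := by
      intro k hk z' hz' p hp
      rw [hkeys'] at hk
      rcases List.mem_append.mp hk with hk | hk
      · exact hdisj k hk z' (List.mem_cons_of_mem _ hz') p hp
      · obtain ⟨q, hq, rfl⟩ := List.mem_map.mp hk
        intro heq
        have : z = z' := by
          have hlq : q.1.length = p.1.length := by rw [hlen q hq, hlen p hp]
          have := List.append_inj_right heq hlq
          simpa using this
        exact hzne (this ▸ hz')
    have := ih d' ((List.nodup_cons.mp hzl).2) hL hlen hnd' hdisj'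
    simp only [List.foldl_cons]
    rw [← hd', this, hrow]
    simp [List.flatMap_cons]

lemma pv_iterA (lines : List String) (w h : Int) :
    ∀ (n m : Nat) (L : List (List Int × Bool)), 2 ≤ m → pvProps lines w h m L →
    ((List.replicate n (PySem.List.pyRange (-1) 2 1)).foldl (fun res layer =>
        layer.foldl (fun new z =>
          res.keys.foldl (fun new coord =>
            new.insert (coord ++ [z]) (if z == 0 then res.getD coord false else false)) new)
          PySem.Dict.empty) (PySem.Dict.mk L)).items
      = pvIter n L := by
  intro n
  induction n with
  | zero => intro m L _ _; rfl
  | succ n ih =>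
    intro m L hm hL
    obtain ⟨hnd, hall⟩ := hL
    rw [List.replicate_succ, List.foldl_cons]
    have hinner : ((PySem.List.pyRange (-1) 2 1).foldl (fun new z =>
        (PySem.Dict.mk L).keys.foldl (fun new coord =>
          new.insert (coord ++ [z]) (if z == 0 then (PySem.Dict.mk L).getD coord false else false)) new)
        PySem.Dict.empty) = PySem.Dict.mk (pvLayer L) := by
      have h1 : ((PySem.List.pyRange (-1) 2 1).foldl (fun new z =>
          (PySem.Dict.mk L).keys.foldl (fun new coord =>
            new.insert (coord ++ [z]) (if z == 0 then (PySem.Dict.mk L).getD coord false else false)) new)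
          PySem.Dict.empty)
          = ((PySem.List.pyRange (-1) 2 1).foldl (fun new z =>
          L.foldl (fun new p => new.insert (p.1 ++ [z]) (if z == 0 then p.2 else false)) new)
          PySem.Dict.empty) := by
        apply PySem.List.foldl_congr_mem
        intro acc z _
        exact pv_keys_to_items L hnd z acc
      rw [h1]
      apply PySem.Dict.ext
      rw [pv_layer_fold L m (PySem.List.pyRange (-1) 2 1) PySem.Dict.empty
        (PySem.List.nodup_pyRange_one _ _) hnd (fun p hp => (hall p hp).1)
        (by simp [PySem.Dict.empty, PySem.Dict.keys])
        (by intro k hk; simp [PySem.Dict.empty, PySem.Dict.keys] at hk)]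
      simp [PySem.Dict.empty, pvLayer]
    rw [hinner, ih (m+1) (pvLayer L) (by omega) (pv_layer_props lines w h m L hm ⟨hnd, hall⟩)]
    rfl

-- the explicit-stack loop processes each pending entry like the recursive fill
lemma pv_loop_fill : ∀ (rest : List (List Int)) (s : List Int)
    (stk : List (List Int × List (List Int))) (d : PySem.Dict (List Int) Bool),
    pvFillLoop ((s, rest) :: stk) d = pvFillLoop stk (pvFill rest s d) := by
  intro rest
  induction rest with
  | nil => intro s stk d; rw [pvFillLoop]; rfl
  | cons a r ih =>
    intro s stk d
    rw [pvFillLoop]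
    show pvFillLoop ((a.map (fun v => (v :: s, r))) ++ stk) d
      = pvFillLoop stk (a.foldl (fun d v => pvFill r (v :: s) d) d)
    induction a generalizing d with
    | nil => simp
    | cons v a' iha =>
      rw [List.map_cons, List.cons_append, ih (v :: s) _ d, List.foldl_cons]
      exact iha (pvFill r (v :: s) d)

-- B's fill is the foldl of inserts over the pvKeys list
lemma pv_fill_eq : ∀ (axes : List (List Int)) (s : List Int) (d : PySem.Dict (List Int) Bool),
    pvFill axes s d = (pvKeys axes s).foldl (fun d k => d.insert k false) d := by
  intro axes
  induction axes with
  | nil => intro s d; rfl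
  | cons a rest ih =>
    intro s d
    show a.foldl (fun d v => pvFill rest (v :: s) d) d = _
    rw [pvKeys, List.foldl_flatMap]
    apply PySem.List.foldl_congr_mem
    intro acc v _
    exact ih (v :: s) acc

-- the fill's key order is exactly A's final key order (with the accumulated suffix appended)
lemma pv_keys_iter (lines : List String) (w h : Int) :
    ∀ (n : Nat) (s : List Int),
    pvKeys (List.replicate n (PySem.List.pyRange (-1) 2 1) ++
        [PySem.List.pyRange (-1) (h + 1) 1, PySem.List.pyRange (-1) (w + 1) 1]) s
      = (pvIter n (pvGrid lines w h)).map (fun p => p.1 ++ s) := by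
  intro n
  induction n with
  | zero =>
    intro s
    show pvKeys [_, _] s = (pvGrid lines w h).map (fun p => p.1 ++ s)
    simp only [pvKeys, pvGrid, List.map_flatMap, List.map_map]
    congr 1; funext y
    rw [← List.map_eq_flatMap]
    rfl
  | succ n ih =>
    intro s
    rw [List.replicate_succ, List.cons_append]
    show (PySem.List.pyRange (-1) 2 1).flatMap (fun v => pvKeys _ (v :: s)) = _
    rw [pv_iter_succ_out]
    unfold pvLayer
    rw [List.map_flatMap]
    congr 1; funext z
    rw [ih (z :: s), List.map_map]
    congr 1; funext p
    simp

-- folding value-overwrites of EXISTING distinct keys maps the items pointwise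
lemma pv_fold_insert_mem : ∀ (P : List (List Int × Bool)) (D : PySem.Dict (List Int) Bool),
    (∀ p ∈ P, D.contains p.1 = true) → (P.map (·.1)).Nodup → D.keys.Nodup →
    (P.foldl (fun d p => d.insert p.1 p.2) D).items
      = D.items.map (fun q => (q.1, ((PySem.Dict.mk P).get? q.1).getD q.2)) := by
  intro P
  induction P with
  | nil =>
    intro D _ _ _
    simp [PySem.Dict.get?]
  | cons p P ih =>
    intro D hc hnd hD
    obtain ⟨k0, v0⟩ := p
    have hpP : k0 ∉ P.map (·.1) := (List.nodup_cons.mp hnd).1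
    have hDc : D.contains k0 = true := hc (k0, v0) List.mem_cons_self
    rw [List.foldl_cons, ih (D.insert k0 v0)
      (fun q hq => by rw [PySem.Dict.contains_insert]; simp [hc q (List.mem_cons_of_mem _ hq)])
      ((List.nodup_cons.mp hnd).2)
      (PySem.Dict.nodup_keys_insert _ _ _ hD)]
    rw [PySem.Dict.items_insert_of_contains _ _ hDc, List.map_map]
    apply List.map_congr_left
    intro q _
    obtain ⟨qk, qv⟩ := q
    by_cases hq : qk = k0
    · have hPnone : (PySem.Dict.mk P).get? k0 = none := by
        rw [PySem.Dict.get?_eq_none_iff_not_mem_keys]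
        simpa [PySem.Dict.keys] using hpP
      simp [hq, PySem.Dict.get?_mk_cons, hPnone]
    · have hbeq : (k0 == qk) = false := by simp [Ne.symm hq]
      simp [hq, PySem.Dict.get?_mk_cons, hbeq]

-- in-bounds cells padded with zeros are among A's keys
lemma pv_mem_keys (lines : List String) (w h x y : Int)
    (hx : 0 ≤ x) (hx2 : x < w) (hy : 0 ≤ y) (hy2 : y < h) :
    ∀ n, ([x, y] ++ List.replicate n 0) ∈ (pvIter n (pvGrid lines w h)).map (·.1) := by
  intro n
  induction n with
  | zero =>
    simp only [List.replicate_zero, List.append_nil]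
    refine List.mem_map.mpr ⟨([x, y], pvValA lines w h x y), ?_, rfl⟩
    unfold pvGrid
    refine List.mem_flatMap.mpr ⟨y, ?_, List.mem_map.mpr ⟨x, ?_, rfl⟩⟩
    · rw [PySem.List.mem_pyRange_one]; omega
    · rw [PySem.List.mem_pyRange_one]; omega
  | succ n ih =>
    rw [pv_iter_succ_out]
    obtain ⟨p, hp, hpk⟩ := List.mem_map.mp ih
    refine List.mem_map.mpr ⟨(p.1 ++ [0], if (0:Int) == 0 then p.2 else false), ?_, ?_⟩
    · unfold pvLayer
      refine List.mem_flatMap.mpr ⟨0, ?_, List.mem_map.mpr ⟨p, hp, rfl⟩⟩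
      rw [PySem.List.mem_pyRange_one]; omega
    · simp [hpk, List.replicate_succ']

-- B's 2-D activity map, rows appended in order (pair keys)
lemma pv_grid2 (lines : List String) (w : Int) :
    ∀ (ys : List Int) (d : PySem.Dict (Int × Int) Bool),
    ys.Nodup → d.keys.Nodup →
    (∀ k ∈ d.keys, ∀ y ∈ ys, ∀ x ∈ PySem.List.pyRange 0 w 1, k ≠ (x, y)) →
    ((ys.foldl (fun d y =>
        (PySem.List.pyRange 0 w 1).foldl (fun d x =>
          d.insert (x, y) (((PySem.List.pyGet? lines y).bind fun s => PySem.Str.pyGet? s x) == some '#')) d) d).items)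
      = d.items ++ ys.flatMap (fun y =>
          (PySem.List.pyRange 0 w 1).map fun x =>
            ((x, y), ((PySem.List.pyGet? lines y).bind fun s => PySem.Str.pyGet? s x) == some '#')) := by
  intro ys
  induction ys with
  | nil => intro d _ _ _; simp
  | cons y ys ih =>
    intro d hys hd hdisj
    have hyne : y ∉ ys := (List.nodup_cons.mp hys).1
    set xs := PySem.List.pyRange 0 w 1 with hxs
    have hfresh : ∀ x ∈ xs, d.contains ((x, y)) = false := by
      intro x hx
      by_contra hcb
      have : d.contains (x, y) = true := by revert hcb; cases d.contains (x, y) <;> simp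
      have hk : (x, y) ∈ d.keys := (PySem.Dict.contains_iff_mem_keys _ _).mp this
      exact hdisj _ hk y (List.mem_cons_self) x hx rfl
    have hknd : (xs.map fun x => ((x, y) : Int × Int)).Nodup := by
      refine (PySem.List.nodup_pyRange_one _ _).map ?_
      intro a b hab; simpa using hab
    have hrow := PySem.Dict.items_foldl_insert_fresh xs (fun x => ((x, y) : Int × Int))
      (fun x => ((PySem.List.pyGet? lines y).bind fun s => PySem.Str.pyGet? s x) == some '#') d hfresh hknd
    set d' := xs.foldl (fun d x =>
      d.insert (x, y) (((PySem.List.pyGet? lines y).bind fun s => PySem.Str.pyGet? s x) == some '#')) d with hd'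
    have hkeys' : d'.keys = d.keys ++ xs.map (fun x => (x, y)) := by
      show d'.items.map (·.1) = _
      rw [hrow]; simp [PySem.Dict.keys]
    have hnd' : d'.keys.Nodup := by
      exact PySem.Dict.nodup_keys_foldl_insert_key xs (fun x => (x, y))
        (fun _ x => ((PySem.List.pyGet? lines y).bind fun s => PySem.Str.pyGet? s x) == some '#') d hd
    have hdisj' : ∀ k ∈ d'.keys, ∀ y' ∈ ys, ∀ x ∈ xs, k ≠ (x, y') := by
      intro k hk y' hy' x hx
      rw [hkeys'] at hk
      rcases List.mem_append.mp hk with hk | hk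
      · exact hdisj k hk y' (List.mem_cons_of_mem _ hy') x hx
      · obtain ⟨x', _, rfl⟩ := List.mem_map.mp hk
        intro heq
        have : y = y' := congrArg Prod.snd heq
        exact hyne (this ▸ hy')
    have := ih d' ((List.nodup_cons.mp hys).2) hnd' hdisj'
    simp only [List.foldl_cons]
    rw [← hd', this, hrow]
    simp [List.flatMap_cons]

lemma pv_main (lines : List String) (dimensions : Int) :
    generate_coords lines dimensions = generate_coords_alt lines dimensions := by
  simp only [generate_coords, generate_coords_alt]
  set w : Int := PySem.Str.len (PySem.List.pyGetD lines 0 "") with hw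
  set h : Int := (lines.length : Int) with hh
  set n : Nat := (dimensions - 2).toNat with hn
  set zr := PySem.List.pyRange (-1) 2 1 with hzr
  set xs := PySem.List.pyRange (-1) (w + 1) 1 with hxs
  set ys := PySem.List.pyRange (-1) (h + 1) 1 with hys
  set G := pvGrid lines w h with hG
  -- A's 2-D grid dict
  have hgrid : (ys.foldl (fun d y => xs.foldl (fun d x =>
      d.insert [x, y] (pvValA lines w h x y)) d) PySem.Dict.empty) = PySem.Dict.mk G := by
    apply PySem.Dict.ext
    rw [pv_rows lines w h ys PySem.Dict.empty (PySem.List.nodup_pyRange_one _ _)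
      (by simp [PySem.Dict.empty, PySem.Dict.keys])
      (by intro k hk; simp [PySem.Dict.empty, PySem.Dict.keys] at hk)]
    simp [PySem.Dict.empty, pvGrid, hG]
    rfl
  have hlayers : ((PySem.List.pyRange 0 (dimensions - 2) 1).map (fun _ => zr)) = List.replicate n zr := by
    rw [PySem.List.pyRange_one]
    simp [Function.comp_def, List.map_const', hn]
  rw [hgrid, hlayers, pv_iterA lines w h n 2 G (by omega) (hG ▸ pv_grid_props lines w h)]
  -- the invariant at the end
  obtain ⟨hndI, hallI⟩ := pv_iter_props lines w h n 2 G (by omega) (hG ▸ pv_grid_props lines w h)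
  set L := pvIter n G with hL
  set KA := L.map (·.1) with hKA
  -- B's phase 1: the all-False dict over KA
  have hloop : pvFillLoop [([], List.replicate n zr ++ [ys, xs])] PySem.Dict.empty
      = pvFill (List.replicate n zr ++ [ys, xs]) [] PySem.Dict.empty := by
    rw [pv_loop_fill, pvFillLoop]
  rw [hloop]
  have hfill : (pvFill (List.replicate n zr ++ [ys, xs]) [] PySem.Dict.empty).items
      = KA.map (fun k => (k, false)) := by
    rw [pv_fill_eq, pv_keys_iter lines w h n []]
    have hid : (pvIter n (pvGrid lines w h)).map (fun p => p.1 ++ ([] : List Int)) = KA := by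
      simp [hKA, hL, hG]
    rw [hid]
    rw [PySem.Dict.items_foldl_insert_fresh KA (fun k => k) (fun _ => false) PySem.Dict.empty
      (fun a _ => PySem.Dict.contains_empty _) (by simpa using hndI)]
    simp [PySem.Dict.empty]
  set D := pvFill (List.replicate n zr ++ [ys, xs]) [] PySem.Dict.empty with hD
  have hDkeys : D.keys = KA := by
    show D.items.map (·.1) = KA
    rw [hfill, List.map_map]
    simp [Function.comp_def]
  -- B's 2-D activity map
  set zeros : List Int := List.replicate n 0 with hzeros
  set Pxy : List ((Int × Int) × Bool) := (PySem.List.pyRange 0 h 1).flatMap (fun y =>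
    (PySem.List.pyRange 0 w 1).map (fun x =>
      ((x, y), ((PySem.List.pyGet? lines y).bind fun s => PySem.Str.pyGet? s x) == some '#'))) with hPxy
  have hgrid2 : ((PySem.List.pyRange 0 h 1).foldl (fun d y =>
      (PySem.List.pyRange 0 w 1).foldl (fun d x =>
        d.insert (x, y) (((PySem.List.pyGet? lines y).bind fun s => PySem.Str.pyGet? s x) == some '#')) d)
      PySem.Dict.empty) = PySem.Dict.mk Pxy := by
    apply PySem.Dict.ext
    rw [pv_grid2 lines w (PySem.List.pyRange 0 h 1) PySem.Dict.empty (PySem.List.nodup_pyRange_one _ _)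
      (by simp [PySem.Dict.empty, PySem.Dict.keys])
      (by intro k hk; simp [PySem.Dict.empty, PySem.Dict.keys] at hk)]
    simp [PySem.Dict.empty, hPxy]
  rw [hgrid2]
  -- B's phase 2 as a flat fold over P
  set P : List (List Int × Bool) := Pxy.map (fun p => ([p.1.1, p.1.2] ++ zeros, p.2)) with hP
  have hflat : ((PySem.Dict.mk Pxy).items.foldl (fun d p =>
      d.insert ([p.1.1, p.1.2] ++ zeros) p.2) D) = P.foldl (fun d p => d.insert p.1 p.2) D := by
    rw [hP, List.foldl_map]
  -- facts about P
  have hPmem : ∀ p ∈ P, ∃ x y, 0 ≤ x ∧ x < w ∧ 0 ≤ y ∧ y < h ∧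
      p = ([x, y] ++ zeros, ((PySem.List.pyGet? lines y).bind fun s => PySem.Str.pyGet? s x) == some '#') := by
    intro p hp
    rw [hP, hPxy] at hp
    simp only [List.map_flatMap, List.map_map, List.mem_flatMap, List.mem_map] at hp
    obtain ⟨y, hy, x, hx, rfl⟩ := hp
    rw [PySem.List.mem_pyRange_one] at hy hx
    exact ⟨x, y, by omega, by omega, by omega, by omega, rfl⟩
  have hPnodup : (P.map (·.1)).Nodup := by
    rw [hP, hPxy]
    simp only [List.map_flatMap, List.map_map]
    rw [List.nodup_flatMap]
    constructor
    · intro y _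
      refine (PySem.List.nodup_pyRange_one _ _).map ?_
      intro a b hab; simpa using hab
    · refine (PySem.List.nodup_pyRange_one _ _).imp ?_
      intro y y' hne k hk hk'
      simp only [List.mem_map] at hk hk'
      obtain ⟨x, _, rfl⟩ := hk
      obtain ⟨x', _, h'⟩ := hk'
      have hyy : y' = y := by
        have := congrArg (fun l => l.getD 1 0) h'
        simpa using this
      subst hyy
      exact hne rfl
  have hPin : ∀ p ∈ P, D.contains p.1 = true := by
    intro p hp
    obtain ⟨x, y, hx, hx2, hy, hy2, rfl⟩ := hPmem p hp
    rw [PySem.Dict.contains_iff_mem_keys, hDkeys, hKA, hL, hG]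
    exact pv_mem_keys lines w h x y hx hx2 hy hy2 n
  rw [hflat, pv_fold_insert_mem P D hPin hPnodup (by rw [hDkeys]; exact hndI), hfill, List.map_map]
  -- pointwise: the overwritten value at each key k ∈ KA is pvVal k
  have hpoint : ∀ k ∈ KA, ((PySem.Dict.mk P).get? k).getD false = pvVal lines w h k := by
    intro k hk
    obtain ⟨p, hpL, rfl⟩ := List.mem_map.mp hk
    have hlen : p.1.length = 2 + n := (hallI p hpL).1
    by_cases hmem : p.1 ∈ P.map (·.1)
    · obtain ⟨q, hq, hqk⟩ := List.mem_map.mp hmem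
      obtain ⟨x, y, hx, hx2, hy, hy2, rfl⟩ := hPmem q hq
      have hget : (PySem.Dict.mk P).get? ([x, y] ++ zeros)
          = some (((PySem.List.pyGet? lines y).bind fun s => PySem.Str.pyGet? s x) == some '#') :=
        PySem.Dict.get?_of_mem_items _ (by simpa using hq) (by simpa [PySem.Dict.keys] using hPnodup)
      rw [← hqk, hget, Option.getD_some]
      show _ = pvVal lines w h ([x, y] ++ zeros)
      rw [hzeros, pv_val_zeros lines w h [x, y] (by simp) n, pv_val_base lines w h x y]
      unfold pvValA
      rw [if_pos ⟨hx, hx2, hy, hy2⟩]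
    · have hget : (PySem.Dict.mk P).get? p.1 = none := by
        rw [PySem.Dict.get?_eq_none_iff_not_mem_keys]
        simpa [PySem.Dict.keys] using hmem
      rw [hget]
      -- pvVal p.1 must be false: otherwise p.1 = [x,y] ++ zeros for in-bounds x,y ∈ P's keys
      cases hv : pvVal lines w h p.1 with
      | false => rfl
      | true =>
        exfalso
        have hlen2 : 2 ≤ p.1.length := by omega
        obtain ⟨a, b, t, hk3⟩ : ∃ a b t, p.1 = a :: b :: t := by
          match p.1, hlen2 with | a :: b :: t, _ => exact ⟨a, b, t, rfl⟩
        rw [hk3] at hv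
        unfold pvVal at hv
        have hsl : PySem.List.slice (a :: b :: t) (some 2) none = t := by
          have := PySem.List.slice_from_natCast (xs := a :: b :: t) (a := 2)
          exact_mod_cast this
        have h0 : PySem.List.pyGetD (a :: b :: t) (0:Int) 0 = a := by simp [PySem.List.pyGetD]
        have h1 : PySem.List.pyGetD (a :: b :: t) (1:Int) 0 = b := by simp [PySem.List.pyGetD]
        rw [hsl] at hv
        simp only [h0, h1, Bool.and_eq_true, decide_eq_true_eq, List.all_eq_true, beq_iff_eq] at hv
        obtain ⟨⟨⟨⟨ha1, ha2⟩, hb1⟩, hhash⟩, hzero⟩ := hv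
        have ht : t = zeros := by
          rw [hzeros]
          refine List.eq_replicate_iff.mpr ⟨?_, hzero⟩
          rw [hk3] at hlen; simp at hlen; omega
        apply hmem
        rw [hP, hPxy]
        simp only [List.map_flatMap, List.map_map, List.mem_flatMap, List.mem_map]
        refine ⟨b, by rw [PySem.List.mem_pyRange_one] <;> omega,
          a, by rw [PySem.List.mem_pyRange_one] <;> omega, ?_⟩
        simp [hk3, ht]
  -- assemble: both sides are KA.map (fun k => (k, pvVal k))
  rw [List.map_map]
  conv_lhs => rw [show L = L.map id from (List.map_id L).symm]
  apply List.map_congr_left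
  intro p hp
  obtain ⟨k, v⟩ := p
  have hkmem : k ∈ KA := by rw [hKA]; exact List.mem_map_of_mem hp
  have hv : pvVal lines w h k = v := (hallI _ hp).2
  simp only [Function.comp_def, id_eq]
  rw [hpoint k hkmem, hv]

-- ===== VERDICT (by name: the statement is the Claim_ definition above) =====
theorem generate_coords_spec : Claim_equal_generate_coords := by
  intro lines dimensions _ _
  unfold Spec_generate_coords
  exact pv_main lines dimensions
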